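-- pv_equiv track=rewrite | github.com/khuushichand/aiml-project | tldw_Server_API/app/core/Ingestion_Media_Processing/OCR/backends/hunyuan_ocr.py | _clean_repeated_substrings
-- ===== SOURCE A (Python) =====
-- def _clean_repeated_substrings(text: str) -> str:
--     if not text:
--         return text
--     # Safer heuristic: collapse consecutive duplicate lines (keeps first 2).
--     lines = text.splitlines()
--     if not lines:
--         return text
--     out = []
--     prev = None
--     repeat = 0
--     for line in lines:
--         if line == prev:
--             repeat += 1
--             if repeat <= 2:
--                 out.append(line)
--         else:
--             prev = line
--             repeat = 1
--             out.append(line)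
--     return "\n".join(out)
-- ===== SOURCE B (Python) =====
-- def _clean_repeated_substrings(text: str) -> str:
--     if not text:
--         return text
--     lines = text.splitlines()
--     if not lines:
--         return text
--     # Stateless shift-and-compare: build the two shifted columns once, then
--     # filter each line against the lines one and two positions before it.
--     shift1 = [None] + lines
--     shift2 = [None, None] + lines
--     kept = [l for l, a, b in zip(lines, shift1, shift2) if l != a or l != b]
--     return "\n".join(kept)
-- ===== Notes on version B (the rewrite author's own statement) =====
-- stated objective: alternative
-- what changed: Replaces the rolling prev/repeat-counter state machine with a stateless shift-and-compare: build two shifted copies of the line list and keep each line that differs from either of the two lines before it.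
import Mathlib
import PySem

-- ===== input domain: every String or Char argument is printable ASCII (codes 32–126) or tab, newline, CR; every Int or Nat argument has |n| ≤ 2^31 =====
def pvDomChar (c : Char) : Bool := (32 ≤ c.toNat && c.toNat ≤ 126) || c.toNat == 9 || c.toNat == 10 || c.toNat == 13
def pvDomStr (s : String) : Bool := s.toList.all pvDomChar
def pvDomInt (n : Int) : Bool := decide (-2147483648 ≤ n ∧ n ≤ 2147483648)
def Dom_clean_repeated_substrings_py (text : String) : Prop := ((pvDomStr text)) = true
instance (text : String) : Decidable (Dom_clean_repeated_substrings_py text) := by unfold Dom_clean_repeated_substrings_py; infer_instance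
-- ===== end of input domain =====

-- B replaces A's rolling prev/repeat state machine with a stateless shift-and-compare
-- (zip the line list with its two shifted copies and filter); objective: alternative.

-- ===== PORT A =====
-- the for-loop: state (out, prev, repeat); prev = none models Python's initial None
def pvStepA (st : List String × Option String × Nat) (line : String) : List String × Option String × Nat :=
  match st with
  | (out, prev, rep) =>
    if some line = prev then
      (if rep + 1 ≤ 2 then out ++ [line] else out, prev, rep + 1)
    else
      (out ++ [line], some line, 1)

def clean_repeated_substrings_py (text : String) : String :=
  if text.toList = [] then text
  else if PySem.Str.splitlines text = [] then text
  else PySem.Str.join "\n" (((PySem.Str.splitlines text).foldl pvStepA ([], none, 0)).1)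

-- ===== PORT B =====
-- shift1 = [None] + lines, shift2 = [None, None] + lines (None = Option.none sentinel);
-- zip truncates to lines.length as Python's zip does; keep l when l != a or l != b.
def clean_repeated_substrings_py_alt (text : String) : String :=
  if text.toList = [] then text
  else if PySem.Str.splitlines text = [] then text
  else
    let lines := PySem.Str.splitlines text
    let shift1 : List (Option String) := none :: lines.map some
    let shift2 : List (Option String) := none :: none :: lines.map some
    let kept := (lines.zip (shift1.zip shift2)).filterMap
      (fun p => if some p.1 ≠ p.2.1 ∨ some p.1 ≠ p.2.2 then some p.1 else none)
    PySem.Str.join "\n" kept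

-- ===== PRECONDITION & SPEC =====
def Spec_clean_repeated_substrings_py (text : String) (out : String) : Prop := out = clean_repeated_substrings_py_alt text
instance (text : String) (out : String) : Decidable (Spec_clean_repeated_substrings_py text out) := by unfold Spec_clean_repeated_substrings_py; infer_instance

-- ===== CLAIM (what is proved, stated in full; the proofs are below) =====
def Claim_equal_clean_repeated_substrings_py : Prop := ∀ (text : String), Dom_clean_repeated_substrings_py text → Spec_clean_repeated_substrings_py text (clean_repeated_substrings_py text)

-- ===== LEMMAS AND PROOFS =====

-- common spec: keep a line unless both lookbacks equal it
def pvG (p2 p1 : Option String) : List String → List String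
  | [] => []
  | x :: xs => (if some x = p1 ∧ some x = p2 then [] else [x]) ++ pvG p1 (some x) xs

lemma pvB_eq_G (lines : List String) : ∀ (p1 p2 : Option String),
    (lines.zip ((p1 :: lines.map some).zip (p2 :: p1 :: lines.map some))).filterMap
      (fun p => if some p.1 ≠ p.2.1 ∨ some p.1 ≠ p.2.2 then some p.1 else none)
      = pvG p2 p1 lines := by
  induction lines with
  | nil => intro p1 p2; rfl
  | cons x xs ih =>
    intro p1 p2
    have h3 := ih (some x) p1
    simp only [List.zip_cons_cons] at h3
    simp only [List.map_cons, List.zip_cons_cons, List.filterMap_cons, pvG, h3]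
    by_cases h : some x = p1 ∧ some x = p2
    · rw [if_neg (by tauto), if_pos h]; simp
    · rw [if_pos (by tauto), if_neg h]; simp

lemma pvA_eq_G (lines : List String) : ∀ (out : List String) (p1 p2 : Option String) (rep : Nat),
    (∀ x, p1 = some x → 1 ≤ rep ∧ (p1 = p2 ↔ 2 ≤ rep)) →
    (lines.foldl pvStepA (out, p1, rep)).1 = out ++ pvG p2 p1 lines := by
  induction lines with
  | nil => intro out p1 p2 rep _; simp [pvG]
  | cons x xs ih =>
    intro out p1 p2 rep hinv
    simp only [List.foldl_cons, pvStepA]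
    by_cases h : some x = p1
    · subst h
      obtain ⟨hrep, hiff⟩ := hinv x rfl
      rw [if_pos rfl]
      have hnext : ∀ y, (some x : Option String) = some y →
          1 ≤ rep + 1 ∧ ((some x : Option String) = some x ↔ 2 ≤ rep + 1) :=
        fun y _ => ⟨by omega, ⟨fun _ => by omega, fun _ => rfl⟩⟩
      rw [ih _ (some x) (some x) (rep + 1) hnext]
      by_cases h2 : rep + 1 ≤ 2
      · have hr1 : rep = 1 := by omega
        have hp2 : ¬ some x = p2 := fun hc => by
          have := hiff.mp hc; omega
        rw [if_pos h2]
        simp [pvG, hp2, List.append_assoc]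
      · have hp2 : some x = p2 := hiff.mpr (by omega)
        rw [if_neg h2]
        simp [pvG, hp2]
    · rw [if_neg h]
      have hnext : ∀ y, (some x : Option String) = some y →
          1 ≤ 1 ∧ ((some x : Option String) = p1 ↔ 2 ≤ 1) :=
        fun y _ => ⟨le_refl 1, ⟨fun hc => absurd hc h, fun hc => by omega⟩⟩
      rw [ih _ (some x) p1 1 hnext]
      simp [pvG, h, List.append_assoc]

-- ===== VERDICT (by name: the statement is the Claim_ definition above) =====
theorem clean_repeated_substrings_py_spec : Claim_equal_clean_repeated_substrings_py := by
  intro text _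
  unfold Spec_clean_repeated_substrings_py clean_repeated_substrings_py clean_repeated_substrings_py_alt
  split
  · rfl
  · split
    · rfl
    · rw [pvA_eq_G _ [] none none 0 (fun x hx => by cases hx), List.nil_append]
      exact congrArg (PySem.Str.join "\n") (pvB_eq_G (PySem.Str.splitlines text) none none).symm
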